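-- pv_equiv track=rewrite | github.com/ECD5A/EllipticZero | app/tools/smart_contract_utils.py | _contains_collateral_logic
-- ===== SOURCE A (Python) =====
-- def _contains_collateral_logic(signature: str, body: str) -> bool:
--     combined = f"{signature}\n{body}".lower()
--     return any(
--         token in combined
--         for token in (
--             "collateral",
--             "borrow",
--             "repay",
--             "debt",
--             "liquidat",
--             "healthfactor",
--             "health factor",
--             "ltv",
--             "loan to value",
--             "liquidationthreshold",
--             "closefactor",
--             "position",
--         )
--     )
-- ===== SOURCE B (Python) =====
-- _TOKENS = (
--     "collateral",
--     "borrow",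
--     "repay",
--     "debt",
--     "liquidat",
--     "healthfactor",
--     "health factor",
--     "ltv",
--     "loan to value",
--     "liquidationthreshold",
--     "closefactor",
--     "position",
-- )
--
--
-- def _build_trie(tokens):
--     # Trie in automaton form: states are ints (0 = root), transitions a dict
--     # keyed by (state, char), accepting states a set.  Shared prefixes of the
--     # keywords are stored (and matched) only once.
--     trans = {}
--     accept = set()
--     nxt = 1
--     for tok in tokens:
--         s = 0
--         for ch in tok:
--             t = trans.get((s, ch))
--             if t is None:
--                 t = nxt
--                 trans[(s, ch)] = t
--                 nxt += 1
--             s = t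
--         accept.add(s)
--     return trans, accept
--
--
-- _TRANS, _ACCEPT = _build_trie(_TOKENS)
--
--
-- def _contains_collateral_logic(signature: str, body: str) -> bool:
--     # Walk the keyword trie from every position of the lowercased text; a hit
--     # on an accepting state means some keyword occurs as a substring.
--     text = f"{signature}\n{body}".lower()
--     n = len(text)
--     for i in range(n):
--         s = 0
--         j = i
--         while True:
--             if s in _ACCEPT:
--                 return True
--             if j == n:
--                 break
--             t = _TRANS.get((s, text[j]))
--             if t is None:
--                 break
--             s = t
--             j += 1
--     return False
-- ===== Notes on version B (the rewrite author's own statement) =====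
-- stated objective: alternative
-- what changed: A runs one independent substring search per keyword over the combined lowercased text; B precomputes a trie of the keywords in automaton form (int states, a (state,char)->state transition dict, accepting states) and walks it from each position of the text, so shared keyword prefixes are stored and matched once.
import Mathlib
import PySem

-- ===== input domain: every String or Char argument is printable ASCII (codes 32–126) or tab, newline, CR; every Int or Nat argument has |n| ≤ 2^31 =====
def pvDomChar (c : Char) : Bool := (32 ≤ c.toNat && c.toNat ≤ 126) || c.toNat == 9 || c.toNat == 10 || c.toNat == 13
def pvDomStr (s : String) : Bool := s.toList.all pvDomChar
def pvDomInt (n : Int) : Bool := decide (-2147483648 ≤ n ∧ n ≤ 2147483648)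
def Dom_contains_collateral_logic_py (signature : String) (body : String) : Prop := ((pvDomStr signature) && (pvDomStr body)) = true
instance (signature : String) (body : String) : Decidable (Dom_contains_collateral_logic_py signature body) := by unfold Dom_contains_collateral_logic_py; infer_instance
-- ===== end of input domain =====

-- B replaces A's one-substring-search-per-keyword by a keyword TRIE in automaton
-- form (int states, a (state, char) → state transition dict, accepting states),
-- built once and walked from each position of the lowercased text (objective: alternative).

-- the keyword tuple, shared verbatim by both Pythons
def pvTokens : List (List Char) :=
  ["collateral".toList, "borrow".toList, "repay".toList, "debt".toList,
   "liquidat".toList, "healthfactor".toList, "health factor".toList, "ltv".toList,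
   "loan to value".toList, "liquidationthreshold".toList, "closefactor".toList,
   "position".toList]

-- ===== PORT A =====
-- combined = f"{signature}\n{body}".lower(); any(token in combined for token in (...))
def contains_collateral_logic_py (signature : String) (body : String) : Bool :=
  let combined := PySem.Chars.lower (signature.toList ++ '\n' :: body.toList)
  pvTokens.any (fun token => PySem.Chars.isIn token combined)

-- ===== PORT B =====
-- trie state: transition dict, accepting set, next fresh state (Python's trans/accept/nxt)
structure PvTrie where
  trans : PySem.Dict (Nat × Char) Nat
  accept : PySem.Set Nat
  next : Nat

-- inner 'for ch in tok' loop of _build_trie: returns (trans, nxt, end state)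
def pvInsTok : List Char → Nat → PySem.Dict (Nat × Char) Nat → Nat →
    PySem.Dict (Nat × Char) Nat × Nat × Nat
  | [], s, tr, nx => (tr, nx, s)
  | c :: rest, s, tr, nx =>
    match tr.get? (s, c) with
    | some t => pvInsTok rest t tr nx
    | none => pvInsTok rest nx (tr.insert (s, c) nx) (nx + 1)

-- one iteration of 'for tok in tokens' in _build_trie
def pvStep (st : PvTrie) (tok : List Char) : PvTrie :=
  let r := pvInsTok tok 0 st.trans st.next
  ⟨r.1, PySem.Set.add st.accept r.2.2, r.2.1⟩

-- _TRANS, _ACCEPT = _build_trie(_TOKENS)  (module-level, built once)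
def pvTrie : PvTrie := pvTokens.foldl pvStep ⟨PySem.Dict.empty, PySem.Set.empty, 1⟩

-- the inner 'while True' walk from one start position (j indexes the suffix)
def pvWalk (tr : PySem.Dict (Nat × Char) Nat) (acc : PySem.Set Nat) : Nat → List Char → Bool
  | s, cs =>
    if acc.contains s then true
    else
      match cs with
      | [] => false
      | c :: rest =>
        match tr.get? (s, c) with
        | none => false
        | some t => pvWalk tr acc t rest

-- the outer 'for i in range(n)' loop, as recursion over the suffixes of the text
def pvScanB (tr : PySem.Dict (Nat × Char) Nat) (acc : PySem.Set Nat) : List Char → Bool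
  | [] => false
  | c :: rest => pvWalk tr acc 0 (c :: rest) || pvScanB tr acc rest

def contains_collateral_logic_py_alt (signature : String) (body : String) : Bool :=
  let text := PySem.Chars.lower (signature.toList ++ '\n' :: body.toList)
  pvScanB pvTrie.trans pvTrie.accept text

-- ===== PRECONDITION & SPEC =====
def Spec_contains_collateral_logic_py (signature : String) (body : String) (out : Bool) : Prop := out = contains_collateral_logic_py_alt signature body
instance (signature : String) (body : String) (out : Bool) : Decidable (Spec_contains_collateral_logic_py signature body out) := by unfold Spec_contains_collateral_logic_py; infer_instance

-- ===== CLAIM (what is proved, stated in full; the proofs are below) =====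
def Claim_equal_contains_collateral_logic_py : Prop := ∀ (signature : String) (body : String), Dom_contains_collateral_logic_py signature body → Spec_contains_collateral_logic_py signature body (contains_collateral_logic_py signature body)

-- ===== LEMMAS AND PROOFS =====

-- run the transition dict over a word (the mathematical reading of the walk)
def pvRun (tr : PySem.Dict (Nat × Char) Nat) : Nat → List Char → Option Nat
  | s, [] => some s
  | s, c :: w =>
    match tr.get? (s, c) with
    | none => none
    | some t => pvRun tr t w

-- well-formed trie transitions: edges strictly increase and are state-bounded,
-- and each state has at most one incoming edge
def PvGood (tr : PySem.Dict (Nat × Char) Nat) (nx : Nat) : Prop :=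
  (∀ s c t, tr.get? (s, c) = some t → s < t ∧ t < nx) ∧
  (∀ s₁ c₁ s₂ c₂ t, tr.get? (s₁, c₁) = some t → tr.get? (s₂, c₂) = some t →
    s₁ = s₂ ∧ c₁ = c₂)

-- the word w is accepted from the root
def pvAcc (tr : PySem.Dict (Nat × Char) Nat) (acc : PySem.Set Nat) (w : List Char) : Prop :=
  ∃ t, pvRun tr 0 w = some t ∧ t ∈ acc

-- invariant of _build_trie's outer loop after processing 'done'
def PvInv (st : PvTrie) (done : List (List Char)) : Prop :=
  PvGood st.trans st.next ∧ 0 < st.next ∧ (∀ t ∈ st.accept, t < st.next) ∧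
  (∀ w, pvAcc st.trans st.accept w ↔ w ∈ done)

theorem pvRun_le (tr : PySem.Dict (Nat × Char) Nat) (nx : Nat) (hg : PvGood tr nx) :
    ∀ (w : List Char) (s t : Nat), pvRun tr s w = some t → s ≤ t := by
  intro w
  induction w with
  | nil => intro s t h; simp only [pvRun, Option.some.injEq] at h; omega
  | cons c rest ih =>
    intro s t h
    simp only [pvRun] at h
    cases hm : tr.get? (s, c) with
    | none => rw [hm] at h; exact absurd h (by simp)
    | some m =>
      rw [hm] at h
      exact le_of_lt (lt_of_lt_of_le (hg.1 s c m hm).1 (ih m t h))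

theorem pvRun_ext (tr tr' : PySem.Dict (Nat × Char) Nat)
    (hext : ∀ k t, tr.get? k = some t → tr'.get? k = some t) :
    ∀ (w : List Char) (s t : Nat), pvRun tr s w = some t → pvRun tr' s w = some t := by
  intro w
  induction w with
  | nil => intro s t h; simpa [pvRun] using h
  | cons c rest ih =>
    intro s t h
    simp only [pvRun] at h ⊢
    cases hm : tr.get? (s, c) with
    | none => rw [hm] at h; exact absurd h (by simp)
    | some m => rw [hm] at h; rw [hext (s, c) m hm]; exact ih m t h

theorem pvRun_descend (tr tr' : PySem.Dict (Nat × Char) Nat) (nx nx' : Nat)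
    (hg' : PvGood tr' nx')
    (hnew : ∀ k t, tr'.get? k = some t → tr.get? k = some t ∨ nx ≤ t) :
    ∀ (w : List Char) (s t : Nat), pvRun tr' s w = some t → t < nx → pvRun tr s w = some t := by
  intro w
  induction w with
  | nil => intro s t h _; simpa [pvRun] using h
  | cons c rest ih =>
    intro s t h hlt
    simp only [pvRun] at h ⊢
    cases hm : tr'.get? (s, c) with
    | none => rw [hm] at h; exact absurd h (by simp)
    | some m =>
      rw [hm] at h
      have hmt : m ≤ t := pvRun_le tr' nx' hg' rest m t h
      have : tr.get? (s, c) = some m := by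
        rcases hnew (s, c) m hm with hold | hge
        · exact hold
        · omega
      rw [this]
      exact ih m t h hlt

theorem pvRun_snoc (tr : PySem.Dict (Nat × Char) Nat) :
    ∀ (w : List Char) (c : Char) (s : Nat),
      pvRun tr s (w ++ [c]) = (pvRun tr s w).bind (fun a => tr.get? (a, c)) := by
  intro w
  induction w with
  | nil => intro c s; simp [pvRun]; cases tr.get? (s, c) <;> simp
  | cons d rest ih =>
    intro c s
    simp only [List.cons_append, pvRun]
    cases tr.get? (s, d) <;> simp [ih]

theorem pvRun_inj (tr : PySem.Dict (Nat × Char) Nat) (nx : Nat) (hg : PvGood tr nx) :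
    ∀ (w₁ w₂ : List Char) (t : Nat),
      pvRun tr 0 w₁ = some t → pvRun tr 0 w₂ = some t → w₁ = w₂ := by
  intro w₁
  induction w₁ using List.reverseRecOn with
  | nil =>
    intro w₂ t h₁ h₂
    simp [pvRun] at h₁
    subst h₁
    cases w₂ using List.reverseRecOn with
    | nil => rfl
    | append_singleton v d =>
      rw [pvRun_snoc] at h₂
      cases hv : pvRun tr 0 v with
      | none => rw [hv] at h₂; exact absurd h₂ (by simp)
      | some b =>
        rw [hv] at h₂; simp at h₂
        exact absurd (hg.1 b d 0 h₂).1 (by omega)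
  | append_singleton u c ih =>
    intro w₂ t h₁ h₂
    rw [pvRun_snoc] at h₁
    cases hu : pvRun tr 0 u with
    | none => rw [hu] at h₁; exact absurd h₁ (by simp)
    | some a =>
      rw [hu] at h₁; simp at h₁
      cases w₂ using List.reverseRecOn with
      | nil =>
        simp [pvRun] at h₂
        subst h₂
        exact absurd (hg.1 a c 0 h₁).1 (by omega)
      | append_singleton v d =>
        rw [pvRun_snoc] at h₂
        cases hv : pvRun tr 0 v with
        | none => rw [hv] at h₂; exact absurd h₂ (by simp)
        | some b =>
          rw [hv] at h₂; simp at h₂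
          obtain ⟨hs, hc⟩ := hg.2 a c b d t h₁ h₂
          subst hs; subst hc
          rw [ih v a hu hv]

-- full specification of the inner insertion loop
theorem pvInsTok_spec :
    ∀ (tok : List Char) (s : Nat) (tr : PySem.Dict (Nat × Char) Nat) (nx : Nat),
      PvGood tr nx → s < nx →
      PvGood (pvInsTok tok s tr nx).1 (pvInsTok tok s tr nx).2.1 ∧
      nx ≤ (pvInsTok tok s tr nx).2.1 ∧
      (pvInsTok tok s tr nx).2.2 < (pvInsTok tok s tr nx).2.1 ∧
      (∀ k t, tr.get? k = some t → (pvInsTok tok s tr nx).1.get? k = some t) ∧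
      (∀ k t, (pvInsTok tok s tr nx).1.get? k = some t → tr.get? k = some t ∨ nx ≤ t) ∧
      pvRun (pvInsTok tok s tr nx).1 s tok = some (pvInsTok tok s tr nx).2.2 := by
  intro tok
  induction tok with
  | nil =>
    intro s tr nx hg hs
    refine ⟨hg, le_refl _, hs, fun k t h => h, fun k t h => Or.inl h, by simp [pvInsTok, pvRun]⟩
  | cons c rest ih =>
    intro s tr nx hg hs
    simp only [pvInsTok]
    cases hm : tr.get? (s, c) with
    | some t =>
      have ht := hg.1 s c t hm
      obtain ⟨g1, g2, g3, g4, g5, g6⟩ := ih t tr nx hg ht.2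
      refine ⟨g1, g2, g3, g4, g5, ?_⟩
      simp only [pvRun]
      rw [g4 (s, c) t hm]
      exact g6
    | none =>
      -- insert the fresh edge (s, c) ↦ nx
      have hgood' : PvGood (tr.insert (s, c) nx) (nx + 1) := by
        constructor
        · intro s' c' t' h
          rw [PySem.Dict.get?_insert] at h
          split_ifs at h with he
          · obtain ⟨hs', hc'⟩ := Prod.mk.injEq .. ▸ he
            simp at h
            subst h
            cases he
            omega
          · have := hg.1 s' c' t' h
            omega
        · intro s₁ c₁ s₂ c₂ t' h₁ h₂
          rw [PySem.Dict.get?_insert] at h₁ h₂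
          split_ifs at h₁ h₂ with he₁ he₂ he₂
          · cases he₁; cases he₂; exact ⟨rfl, rfl⟩
          · simp at h₁; subst h₁
            have := (hg.1 s₂ c₂ nx h₂).2; omega
          · simp at h₂; subst h₂
            have := (hg.1 s₁ c₁ nx h₁).2; omega
          · exact hg.2 s₁ c₁ s₂ c₂ t' h₁ h₂
      have hext' : ∀ k t, tr.get? k = some t → (tr.insert (s, c) nx).get? k = some t := by
        intro k t h
        rw [PySem.Dict.get?_insert]
        split_ifs with he
        · subst he; rw [hm] at h; exact absurd h (by simp)
        · exact h
      obtain ⟨g1, g2, g3, g4, g5, g6⟩ := ih nx (tr.insert (s, c) nx) (nx + 1) hgood' (by omega)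
      refine ⟨g1, ?_, g3, ?_, ?_, ?_⟩
      · show nx ≤ (pvInsTok rest nx (tr.insert (s, c) nx) (nx + 1)).2.1
        omega
      · intro k t h; exact g4 k t (hext' k t h)
      · intro k t h
        rcases g5 k t h with h' | hge
        · rw [PySem.Dict.get?_insert] at h'
          split_ifs at h' with he
          · simp at h'; omega
          · exact Or.inl h'
        · exact Or.inr (by omega)
      · simp only [pvRun]
        have : (pvInsTok rest nx (tr.insert (s, c) nx) (nx + 1)).1.get? (s, c) = some nx :=
          g4 (s, c) nx (PySem.Dict.get?_insert_self _ _ _)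
        rw [this]
        exact g6

-- one outer-loop iteration preserves the invariant
theorem pvStep_inv (st : PvTrie) (done : List (List Char)) (tok : List Char)
    (h : PvInv st done) : PvInv (pvStep st tok) (done ++ [tok]) := by
  obtain ⟨hg, hpos, hacc, hwords⟩ := h
  obtain ⟨g1, g2, g3, g4, g5, g6⟩ := pvInsTok_spec tok 0 st.trans st.next hg hpos
  refine ⟨g1, ?_, ?_, ?_⟩
  · show 0 < (pvInsTok tok 0 st.trans st.next).2.1
    omega
  · intro t ht
    have ht' : t ∈ PySem.Set.add st.accept (pvInsTok tok 0 st.trans st.next).2.2 := ht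
    show t < (pvInsTok tok 0 st.trans st.next).2.1
    rcases (PySem.Set.mem_add st.accept _ t).1 ht' with h' | h'
    · have := hacc t h'; omega
    · subst h'; exact g3
  · intro w
    rw [List.mem_append, List.mem_singleton]
    constructor
    · rintro ⟨t, hrun, hmem⟩
      have hrun' : pvRun (pvInsTok tok 0 st.trans st.next).1 0 w = some t := hrun
      have hmem' : t ∈ PySem.Set.add st.accept (pvInsTok tok 0 st.trans st.next).2.2 := hmem
      rcases (PySem.Set.mem_add st.accept _ t).1 hmem' with h' | h'
      · left
        have hlt := hacc t h'
        exact (hwords w).1 ⟨t, pvRun_descend st.trans _ st.next _ g1 g5 w 0 t hrun' hlt, h'⟩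
      · right
        subst h'
        exact pvRun_inj _ _ g1 w tok _ hrun' g6
    · rintro (hw | hw)
      · obtain ⟨t, hrun, hmem⟩ := (hwords w).2 hw
        exact ⟨t, pvRun_ext _ _ g4 w 0 t hrun,
          (PySem.Set.mem_add st.accept _ t).2 (Or.inl hmem)⟩
      · subst hw
        exact ⟨_, g6, (PySem.Set.mem_add st.accept _ _).2 (Or.inr rfl)⟩

theorem pvFold_inv :
    ∀ (toks : List (List Char)) (st : PvTrie) (done : List (List Char)),
      PvInv st done → PvInv (toks.foldl pvStep st) (done ++ toks) := by
  intro toks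
  induction toks with
  | nil => intro st done h; simpa using h
  | cons tok rest ih =>
    intro st done h
    have := ih (pvStep st tok) (done ++ [tok]) (pvStep_inv st done tok h)
    simpa using this

theorem pvTrie_inv : PvInv pvTrie pvTokens := by
  have hbase : PvInv ⟨PySem.Dict.empty, PySem.Set.empty, 1⟩ [] := by
    refine ⟨⟨?_, ?_⟩, by exact Nat.one_pos, ?_, ?_⟩
    · intro s c t h; simp [PySem.Dict.get?_empty] at h
    · intro s₁ c₁ s₂ c₂ t h₁ _; simp [PySem.Dict.get?_empty] at h₁
    · intro t ht; simp [PySem.Set.empty] at ht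
    · intro w
      simp only [pvAcc, List.not_mem_nil, iff_false, not_exists]
      rintro t ⟨_, hmem⟩
      simp [PySem.Set.empty] at hmem
  simpa using pvFold_inv pvTokens ⟨PySem.Dict.empty, PySem.Set.empty, 1⟩ [] hbase

-- the walk from state s finds exactly the accepted words that are prefixes of cs
theorem pvWalk_iff (tr : PySem.Dict (Nat × Char) Nat) (acc : PySem.Set Nat) :
    ∀ (cs : List Char) (s : Nat),
      pvWalk tr acc s cs = true ↔ ∃ w t, w <+: cs ∧ pvRun tr s w = some t ∧ t ∈ acc := by
  intro cs
  induction cs with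
  | nil =>
    intro s
    simp only [pvWalk]
    by_cases hs : s ∈ acc
    · rw [if_pos ((PySem.Set.contains_iff acc s).2 hs)]
      simp only [true_iff]
      exact ⟨[], s, List.nil_prefix, rfl, hs⟩
    · rw [if_neg (fun hcontra => hs ((PySem.Set.contains_iff acc s).1 hcontra))]
      constructor
      · intro hcontra; exact absurd hcontra (by simp)
      · rintro ⟨w, t, hpre, hrun, hmem⟩
        rw [List.prefix_nil] at hpre
        subst hpre
        simp only [pvRun, Option.some.injEq] at hrun
        subst hrun
        exact absurd hmem hs
  | cons c rest ih =>
    intro s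
    simp only [pvWalk]
    by_cases hs : s ∈ acc
    · rw [if_pos ((PySem.Set.contains_iff acc s).2 hs)]
      simp only [true_iff]
      exact ⟨[], s, List.nil_prefix, rfl, hs⟩
    · rw [if_neg (fun hcontra => hs ((PySem.Set.contains_iff acc s).1 hcontra))]
      cases hm : tr.get? (s, c) with
      | none =>
        constructor
        · intro hcontra; exact absurd hcontra (by simp)
        · rintro ⟨w, t, hpre, hrun, hmem⟩
          cases w with
          | nil =>
            simp only [pvRun, Option.some.injEq] at hrun
            subst hrun
            exact absurd hmem hs
          | cons d w' =>
            obtain ⟨hd, _⟩ := List.cons_prefix_cons.mp hpre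
            subst hd
            simp only [pvRun, hm] at hrun
            exact absurd hrun (by simp)
      | some m =>
        rw [ih m]
        constructor
        · rintro ⟨w, t, hpre, hrun, hmem⟩
          refine ⟨c :: w, t, List.cons_prefix_cons.mpr ⟨rfl, hpre⟩, ?_, hmem⟩
          simp only [pvRun, hm]
          exact hrun
        · rintro ⟨w, t, hpre, hrun, hmem⟩
          cases w with
          | nil =>
            simp only [pvRun, Option.some.injEq] at hrun
            subst hrun
            exact absurd hmem hs
          | cons d w' =>
            obtain ⟨hd, hpre'⟩ := List.cons_prefix_cons.mp hpre
            subst hd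
            simp only [pvRun, hm] at hrun
            exact ⟨w', t, hpre', hrun, hmem⟩

-- the root walk decides 'some keyword is a prefix of cs'
theorem pvWalk_root (cs : List Char) :
    pvWalk pvTrie.trans pvTrie.accept 0 cs = pvTokens.any (fun token => token.isPrefixOf cs) := by
  obtain ⟨_, _, _, hwords⟩ := pvTrie_inv
  rw [Bool.eq_iff_iff, pvWalk_iff]
  simp only [List.any_eq_true, List.isPrefixOf_iff_prefix]
  constructor
  · rintro ⟨w, t, hpre, hrun, hmem⟩
    exact ⟨w, (hwords w).1 ⟨t, hrun, hmem⟩, hpre⟩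
  · rintro ⟨w, hw, hpre⟩
    obtain ⟨t, hrun, hmem⟩ := (hwords w).2 hw
    exact ⟨w, t, hpre, hrun, hmem⟩

-- the position scan finds a keyword iff some keyword is a substring
theorem pvScanB_eq_any (cs : List Char) :
    pvScanB pvTrie.trans pvTrie.accept cs = pvTokens.any (fun token => PySem.Chars.isIn token cs) := by
  induction cs with
  | nil => decide
  | cons c rest ih =>
    have key :
        (pvTokens.any (fun token => PySem.Chars.isIn token (c :: rest)) = true) ↔
        ((pvTokens.any (fun token => token.isPrefixOf (c :: rest)) ||
          pvTokens.any (fun token => PySem.Chars.isIn token rest)) = true) := by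
      simp only [List.any_eq_true, Bool.or_eq_true, PySem.Chars.isIn_iff_infix,
        List.isPrefixOf_iff_prefix, List.infix_cons_iff, and_or_left, exists_or]
    rw [pvScanB, pvWalk_root, ih]
    exact (Bool.eq_iff_iff.mpr key).symm

-- ===== VERDICT (by name: the statement is the Claim_ definition above) =====
theorem contains_collateral_logic_py_spec : Claim_equal_contains_collateral_logic_py := by
  intro signature body _
  unfold Spec_contains_collateral_logic_py contains_collateral_logic_py contains_collateral_logic_py_alt
  rw [pvScanB_eq_any]
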